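-- pv_equiv track=rewrite | github.com/greenfox-velox/attilakrupl | break/Python CW practice/ExcelFunctions.py | count_if
-- ===== SOURCE A (Python) =====
-- def listOfCriteria(criteria):
--     listOfCrit = []
--     tags = ''
--     numOfTags = 0
--     listOfTags = [">","<","="]
--     for char in str(criteria):
--         if char in listOfTags:
--             tags += char
--             numOfTags += 1
--     word = str(criteria)[numOfTags:len(str(criteria))]
--     if len(tags) > 0:
--         listOfCrit.append(tags)
--     listOfCrit.append(word)
--     return listOfCrit
--
-- def checkCriteria(lst, str):
--     if lst[0] == str:
--         return True
--     else:
--         return False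
--
-- def count_if(values,criteria):
--     result = 0
--     listOfCrit = listOfCriteria(criteria)
--     if len(listOfCrit) == 1:
--         for value in values:
--             if str(value) == str(listOfCrit[0]):
--                 result +=1
--
--     elif checkCriteria(listOfCrit,">="):
--         for num in values:
--             if num >= int(listOfCrit[1]):
--                 result +=1
--     elif checkCriteria(listOfCrit,"<"):
--         for num in values:
--             if num < int(listOfCrit[1]):
--                 result +=1
--     elif checkCriteria(listOfCrit,"<="):
--         for num in values:
--             if num <= int(listOfCrit[1]):
--                 result +=1
--     elif checkCriteria(listOfCrit,"<>"):
--         for num in values: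
--             if num != int(listOfCrit[1]):
--                 result +=1
--     elif checkCriteria(listOfCrit,">"):
--         for num in values:
--             if num > int(listOfCrit[1]):
--                 result +=1
--     return result
-- ===== SOURCE B (Python) =====
-- def _bisect_left(a, x):
--     lo, hi = 0, len(a)
--     while lo < hi:
--         mid = (lo + hi) // 2
--         if a[mid] < x:
--             lo = mid + 1
--         else:
--             hi = mid
--     return lo
--
-- def _bisect_right(a, x):
--     lo, hi = 0, len(a)
--     while lo < hi:
--         mid = (lo + hi) // 2
--         if x < a[mid]:
--             hi = mid
--         else:
--             lo = mid + 1
--     return lo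
--
-- def count_if(values, criteria):
--     s = str(criteria)
--     tags = ''.join(c for c in s if c in '><=')
--     word = s[len(tags):]
--     if tags == '':
--         counts = {}
--         for v in values:
--             key = str(v)
--             counts[key] = counts.get(key, 0) + 1
--         return counts.get(word, 0)
--     if tags not in ('>=', '<', '<=', '<>', '>'):
--         return 0
--     k = int(word)
--     a = sorted(values)
--     n = len(a)
--     below = _bisect_left(a, k)
--     upto = _bisect_right(a, k)
--     if tags == '>=':
--         return n - below
--     if tags == '<':
--         return below
--     if tags == '<=':
--         return upto
--     if tags == '<>':
--         return n - (upto - below)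
--     return n - upto
-- ===== Notes on version B (the rewrite author's own statement) =====
-- stated objective: alternative
-- what changed: B replaces A's per-operator scan loops by order statistics: it sorts the values once and answers every comparison criterion from two hand-written binary searches (bisect_left/bisect_right boundaries combined arithmetically), and answers the no-operator criterion from a hash counter of str(value) built once; Pre_ excludes criteria with a recognised operator but an unparseable number word, where A raises ValueError for nonempty values (and returns 0 on empty values only because it parses inside the loop) while B parses the number up front and raises.
-- outside the precondition, e.g. on count_if([], '>x'): A returns 0, B raises ValueError
import Mathlib
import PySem

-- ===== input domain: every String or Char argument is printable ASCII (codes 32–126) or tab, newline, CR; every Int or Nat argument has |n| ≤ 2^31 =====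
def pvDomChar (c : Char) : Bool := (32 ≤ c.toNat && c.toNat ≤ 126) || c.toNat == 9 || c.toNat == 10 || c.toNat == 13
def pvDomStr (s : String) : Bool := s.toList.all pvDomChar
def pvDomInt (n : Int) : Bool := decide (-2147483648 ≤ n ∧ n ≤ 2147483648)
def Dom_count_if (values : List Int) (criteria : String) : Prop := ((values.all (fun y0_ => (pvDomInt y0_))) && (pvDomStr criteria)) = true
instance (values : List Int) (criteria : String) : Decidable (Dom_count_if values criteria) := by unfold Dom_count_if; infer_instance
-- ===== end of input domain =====

-- B answers comparison criteria by order statistics — sort once, two binary searches, arithmetic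
-- on the boundaries — and the no-operator criterion from a counter dict, instead of A's
-- per-operator scan loops; B parses the number up front, so Pre_ excludes unparseable words.

-- ===== PORT A =====
-- listOfCriteria(criteria): one loop collecting tag chars and their count, then the slice.
def listOfCriteria (criteria : String) : List (List Char) :=
  let st :=
    criteria.toList.foldl
      (fun (acc : List Char × Int) ch =>
        if ch = '>' ∨ ch = '<' ∨ ch = '=' then (acc.1 ++ [ch], acc.2 + 1) else acc)
      ([], 0)
  let word := PySem.List.slice criteria.toList (some st.2) (some (PySem.Str.len criteria))
  if st.1.length > 0 then [st.1, word] else [word]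

-- checkCriteria(lst, s) = (lst[0] == s); lst is always nonempty where A calls it, so getD is never hit.
def checkCriteria (lst : List (List Char)) (s : List Char) : Bool :=
  (PySem.List.pyGet? lst 0).getD [] == s

-- A's if/elif cascade over listOfCrit; int(listOfCrit[1]) sits inside each loop, as in A;
-- `.getD 0` stands where Python raises ValueError (excluded by Pre_count_if).
def countCore (values : List Int) (listOfCrit : List (List Char)) : Int :=
  if listOfCrit.length = 1 then
    values.foldl (fun r v =>
      if PySem.Int.toChars v == (PySem.List.pyGet? listOfCrit 0).getD [] then r + 1 else r) 0
  else if checkCriteria listOfCrit ['>', '='] then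
    values.foldl (fun r v =>
      if v ≥ (PySem.Int.ofChars? ((PySem.List.pyGet? listOfCrit 1).getD [])).getD 0 then r + 1 else r) 0
  else if checkCriteria listOfCrit ['<'] then
    values.foldl (fun r v =>
      if v < (PySem.Int.ofChars? ((PySem.List.pyGet? listOfCrit 1).getD [])).getD 0 then r + 1 else r) 0
  else if checkCriteria listOfCrit ['<', '='] then
    values.foldl (fun r v =>
      if v ≤ (PySem.Int.ofChars? ((PySem.List.pyGet? listOfCrit 1).getD [])).getD 0 then r + 1 else r) 0
  else if checkCriteria listOfCrit ['<', '>'] then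
    values.foldl (fun r v =>
      if v ≠ (PySem.Int.ofChars? ((PySem.List.pyGet? listOfCrit 1).getD [])).getD 0 then r + 1 else r) 0
  else if checkCriteria listOfCrit ['>'] then
    values.foldl (fun r v =>
      if v > (PySem.Int.ofChars? ((PySem.List.pyGet? listOfCrit 1).getD [])).getD 0 then r + 1 else r) 0
  else 0

def count_if (values : List Int) (criteria : String) : Int :=
  countCore values (listOfCriteria criteria)

-- ===== PORT B =====
-- the counter-dict branch of Source B: build counts once, then one lookup
def altCounter (values : List Int) (word : List Char) : Int :=
  (values.foldl
    (fun d v => d.insert (PySem.Int.toChars v)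
      (d.getD (PySem.Int.toChars v) 0 + 1)) PySem.Dict.empty).getD word 0

-- the comparison branch of Source B: sort once, two binary searches (Source B's hand-written
-- _bisect_left/_bisect_right are the textbook loops = PySem.List.bisectLeft/bisectRight),
-- then arithmetic on the boundaries; `| none => 0` stands where int(word) raises ValueError
-- (excluded by Pre_count_if).
def altCompare (values : List Int) (ops word : List Char) : Int :=
  match PySem.Int.ofChars? word with
  | none => 0
  | some k =>
    let a := PySem.List.sorted values (fun x => x) false
    let n : Int := a.length
    let below : Int := (PySem.List.bisectLeft a k : Int)
    let upto : Int := (PySem.List.bisectRight a k : Int)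
    if ops = ['>', '='] then n - below
    else if ops = ['<'] then below
    else if ops = ['<', '='] then upto
    else if ops = ['<', '>'] then n - (upto - below)
    else n - upto

def count_if_alt (values : List Int) (criteria : String) : Int :=
  let s := criteria.toList
  let tags := s.filter (fun c => c = '>' ∨ c = '<' ∨ c = '=')
  let word := s.drop tags.length
  if tags = [] then altCounter values word
  else if tags ∈ [['>', '='], ['<'], ['<', '='], ['<', '>'], ['>']] then
    altCompare values tags word
  else 0

-- ===== PRECONDITION & SPEC =====
-- Pre_ excludes criteria with a recognised operator string but a word int() cannot parse:
-- there A raises ValueError when values is nonempty (and returns 0 on empty values only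
-- because it parses inside the loop), while B parses the number up front and raises.
def Pre_count_if (values : List Int) (criteria : String) : Prop :=
  let ops := criteria.toList.filter (fun c => c = '>' ∨ c = '<' ∨ c = '=')
  ops ∈ [['>', '='], ['<'], ['<', '='], ['<', '>'], ['>']] →
    (PySem.Int.ofChars? (criteria.toList.drop ops.length)).isSome = true
instance (values : List Int) (criteria : String) : Decidable (Pre_count_if values criteria) := by
  unfold Pre_count_if; infer_instance

def pvWitness_count_if : List Int × String := ([3, -1, 7], ">= 2")

def Spec_count_if (values : List Int) (criteria : String) (out : Int) : Prop := out = count_if_alt values criteria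
instance (values : List Int) (criteria : String) (out : Int) : Decidable (Spec_count_if values criteria out) := by unfold Spec_count_if; infer_instance

-- ===== CLAIM =====
def Claim_equal_count_if : Prop := ∀ (values : List Int) (criteria : String), Dom_count_if values criteria → Pre_count_if values criteria → Spec_count_if values criteria (count_if values criteria)

-- ===== LEMMAS AND PROOFS =====

-- A's single parse loop computes (filtered tag chars, their count).
theorem parse_foldl_eq (l acc : List Char) (n : Int) :
    l.foldl
      (fun (acc : List Char × Int) ch =>
        if ch = '>' ∨ ch = '<' ∨ ch = '=' then (acc.1 ++ [ch], acc.2 + 1) else acc)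
      (acc, n)
    = (acc ++ l.filter (fun c => c = '>' ∨ c = '<' ∨ c = '='),
       n + (l.filter (fun c => c = '>' ∨ c = '<' ∨ c = '=')).length) := by
  induction l generalizing acc n with
  | nil => simp
  | cons c l ih =>
    by_cases h : c = '>' ∨ c = '<' ∨ c = '='
    · simp [List.foldl_cons, h, ih]; omega
    · simp [List.foldl_cons, h, ih]

-- A's slice s[numOfTags : len(s)] is List.drop by the tag count.
theorem slice_word_eq (s : List Char) (k : Nat) :
    PySem.List.slice s (some (k : Int)) (some (s.length : Int)) = s.drop k := by
  rw [show ((s.length : Int)) = ((s.length : Nat) : Int) from rfl, PySem.List.slice_natCast]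
  exact List.take_of_length_le (by simp)

theorem count_if_parse (criteria : String) :
    listOfCriteria criteria =
      (let ops := criteria.toList.filter (fun c => c = '>' ∨ c = '<' ∨ c = '=')
       let word := criteria.toList.drop ops.length
       if ops = [] then [word] else [ops, word]) := by
  unfold listOfCriteria
  rw [show (([], (0 : Int)) : List Char × Int) = (([] : List Char), (0 : Int)) from rfl]
  rw [parse_foldl_eq]
  simp only [List.nil_append, Int.zero_add, PySem.Str.len_eq]
  rw [slice_word_eq]
  by_cases h : criteria.toList.filter (fun c => decide (c = '>' ∨ c = '<' ∨ c = '=')) = []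
  · simp only [h]; simp
  · rw [if_pos (List.length_pos_iff.mpr h), if_neg h]

-- bridge a Prop-conditioned counting foldl (A's loops) to List.countP
theorem foldl_count_prop {α : Type} (p : α → Prop) [DecidablePred p] (l : List α) (a : Int) :
    l.foldl (fun r v => if p v then r + 1 else r) a = a + (l.countP (fun v => decide (p v)) : Int) := by
  induction l generalizing a with
  | nil => simp
  | cons x l ih =>
    by_cases h : p x
    · simp [h, ih]; omega
    · simp [h, ih]

-- a predicate that flips exactly at index b is counted by b
theorem countP_boundary (xs : List Int) (p : Int → Bool) (b : Nat) (hb : b ≤ xs.length)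
    (h : ∀ j (hj : j < xs.length), p xs[j] = decide (j < b)) : xs.countP p = b := by
  induction xs generalizing b with
  | nil => simp only [List.length_nil, Nat.le_zero] at hb; simp [hb]
  | cons x xs ih =>
    have h0 : p x = decide (0 < b) := h 0 (by simp)
    cases b with
    | zero =>
      have hx : p x = false := by simpa using h0
      have htail := ih 0 (by omega) (fun j hj => by simpa using h (j + 1) (by simpa using hj))
      simp [hx, htail]
    | succ b' =>
      have hx : p x = true := by simpa using h0
      have htail := ih b' (by simpa using hb) (fun j hj => by
        have := h (j + 1) (by simpa using hj)
        simpa [Nat.succ_lt_succ_iff] using this)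
      simp [hx, htail]

-- the binary-search boundaries on a sorted list are the < k and ≤ k counts
theorem bisectLeft_count (a : List Int) (k : Int) (hp : a.Pairwise (· ≤ ·)) :
    a.countP (fun v => decide (v < k)) = PySem.List.bisectLeft a k := by
  obtain ⟨h1, h2, h3⟩ := PySem.List.bisectLeft_spec a k hp
  refine countP_boundary a _ _ h1 (fun j hj => ?_)
  by_cases hjb : j < PySem.List.bisectLeft a k
  · simp [h2 j hj hjb, hjb]
  · have hge := h3 j hj (by omega)
    rw [decide_eq_false hjb, decide_eq_false (by omega)]

theorem bisectRight_count (a : List Int) (k : Int) (hp : a.Pairwise (· ≤ ·)) :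
    a.countP (fun v => decide (v ≤ k)) = PySem.List.bisectRight a k := by
  obtain ⟨h1, h2, h3⟩ := PySem.List.bisectRight_spec a k hp
  refine countP_boundary a _ _ h1 (fun j hj => ?_)
  by_cases hjb : j < PySem.List.bisectRight a k
  · simp [h2 j hj hjb, hjb]
  · have hgt := h3 j hj (by omega)
    rw [decide_eq_false hjb, decide_eq_false (by omega)]

-- countP bookkeeping on Int lists
theorem cp_le_split (l : List Int) (k : Int) :
    l.countP (fun v => decide (v ≤ k)) = l.countP (fun v => decide (v < k)) + l.count k := by
  induction l with
  | nil => simp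
  | cons x l ih =>
    simp only [List.countP_cons, List.count_cons, decide_eq_true_eq, beq_iff_eq]
    rw [ih]; split_ifs <;> omega

theorem cp_lt_add_ge (l : List Int) (k : Int) :
    l.countP (fun v => decide (v < k)) + l.countP (fun v => decide (k ≤ v)) = l.length := by
  induction l with
  | nil => simp
  | cons x l ih =>
    simp only [List.countP_cons, decide_eq_true_eq, List.length_cons]
    split_ifs <;> omega

theorem cp_le_add_gt (l : List Int) (k : Int) :
    l.countP (fun v => decide (v ≤ k)) + l.countP (fun v => decide (k < v)) = l.length := by
  induction l with
  | nil => simp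
  | cons x l ih =>
    simp only [List.countP_cons, decide_eq_true_eq, List.length_cons]
    split_ifs <;> omega

theorem cp_ne_add_count (l : List Int) (k : Int) :
    l.countP (fun v => decide (¬ v = k)) + l.count k = l.length := by
  induction l with
  | nil => simp
  | cons x l ih =>
    simp only [List.countP_cons, List.count_cons, decide_eq_true_eq, beq_iff_eq, List.length_cons]
    split_ifs <;> omega

-- the counter dict counts exactly the values whose str equals word
theorem altCounter_eq (values : List Int) (word : List Char) :
    altCounter values word = (values.countP (fun v => PySem.Int.toChars v == word) : Int) := by
  unfold altCounter
  rw [← List.foldl_map (f := PySem.Int.toChars)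
        (g := fun d x => PySem.Dict.insert d x (d.getD x 0 + 1))]
  rw [PySem.Dict.getD_foldl_insert_add_one]
  rw [PySem.Dict.getD_empty, List.count_eq_countP, List.countP_map]
  simp [Function.comp_def]

-- the two programs agree once the parse (ops, word) is known
theorem core_eq (values : List Int) (ops word : List Char)
    (hpre : ops ∈ [['>', '='], ['<'], ['<', '='], ['<', '>'], ['>']] →
      (PySem.Int.ofChars? word).isSome = true) :
    countCore values (if ops = [] then [word] else [ops, word]) =
      (if ops = [] then altCounter values word
       else if ops ∈ [['>', '='], ['<'], ['<', '='], ['<', '>'], ['>']] then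
         altCompare values ops word
       else 0) := by
  by_cases h0 : ops = []
  · subst h0
    simp only [ite_true]
    unfold countCore
    rw [if_pos (show ([word] : List (List Char)).length = 1 from rfl)]
    have hw : (PySem.List.pyGet? [word] 0).getD [] = word := by
      simp [PySem.List.pyGet?, PySem.List.pyIdx?]
    rw [hw, PySem.List.foldl_count_if (fun v => PySem.Int.toChars v == word), altCounter_eq]
    simp
  · simp only [if_neg h0]
    unfold countCore
    have hlen : ¬ ([ops, word].length = 1) := by simp
    simp only [hlen, if_false]
    have hget0 : (PySem.List.pyGet? [ops, word] 0).getD [] = ops := by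
      simp [PySem.List.pyGet?, PySem.List.pyIdx?]
    have hget1 : (PySem.List.pyGet? [ops, word] 1).getD [] = word := by
      simp [PySem.List.pyGet?, PySem.List.pyIdx?]
    simp only [checkCriteria, hget0, hget1]
    by_cases hm : ops ∈ [['>', '='], ['<'], ['<', '='], ['<', '>'], ['>']]
    · obtain ⟨k, hk⟩ := Option.isSome_iff_exists.mp (hpre hm)
      simp only [if_pos hm]
      unfold altCompare
      rw [hk]
      simp only [Option.getD_some]
      set a := PySem.List.sorted values (fun x => x) false with ha
      have hperm : a.Perm values := PySem.List.sorted_perm values (fun x => x) false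
      have hpair : a.Pairwise (· ≤ ·) := by
        have := PySem.List.sorted_pairwise values (fun x => x)
        simpa [ha] using this
      have hlen2 : a.length = values.length := hperm.length_eq
      have hbl : a.countP (fun v => decide (v < k)) = PySem.List.bisectLeft a k :=
        bisectLeft_count a k hpair
      have hbr : a.countP (fun v => decide (v ≤ k)) = PySem.List.bisectRight a k :=
        bisectRight_count a k hpair
      have hplt := hperm.countP_eq (fun v => decide (v < k))
      have hple := hperm.countP_eq (fun v => decide (v ≤ k))
      have hpge := hperm.countP_eq (fun v => decide (k ≤ v))
      have hpgt := hperm.countP_eq (fun v => decide (k < v))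
      have hpne := hperm.countP_eq (fun v => decide (¬ v = k))
      have hpc : a.count k = values.count k := hperm.count_eq k
      have e1 := cp_le_split values k
      have e2 := cp_lt_add_ge values k
      have e3 := cp_le_add_gt values k
      have e4 := cp_ne_add_count values k
      fin_cases hm
      · rw [if_pos (show (((['>', '='] : List Char) == ['>', '=']) = true) by decide)]
        rw [if_pos (show ((['>', '='] : List Char) = ['>', '=']) by decide)]
        refine Eq.trans (foldl_count_prop (fun v => k ≤ v) values 0) ?_
        omega
      · rw [if_neg (show ¬ (((['<'] : List Char) == ['>', '=']) = true) by decide)]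
        rw [if_pos (show (((['<'] : List Char) == ['<']) = true) by decide)]
        rw [if_neg (show ¬ ((['<'] : List Char) = ['>', '=']) by decide)]
        rw [if_pos (show ((['<'] : List Char) = ['<']) by decide)]
        refine Eq.trans (foldl_count_prop (fun v => v < k) values 0) ?_
        omega
      · rw [if_neg (show ¬ (((['<', '='] : List Char) == ['>', '=']) = true) by decide)]
        rw [if_neg (show ¬ (((['<', '='] : List Char) == ['<']) = true) by decide)]
        rw [if_pos (show (((['<', '='] : List Char) == ['<', '=']) = true) by decide)]
        rw [if_neg (show ¬ ((['<', '='] : List Char) = ['>', '=']) by decide)]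
        rw [if_neg (show ¬ ((['<', '='] : List Char) = ['<']) by decide)]
        rw [if_pos (show ((['<', '='] : List Char) = ['<', '=']) by decide)]
        refine Eq.trans (foldl_count_prop (fun v => v ≤ k) values 0) ?_
        omega
      · rw [if_neg (show ¬ (((['<', '>'] : List Char) == ['>', '=']) = true) by decide)]
        rw [if_neg (show ¬ (((['<', '>'] : List Char) == ['<']) = true) by decide)]
        rw [if_neg (show ¬ (((['<', '>'] : List Char) == ['<', '=']) = true) by decide)]
        rw [if_pos (show (((['<', '>'] : List Char) == ['<', '>']) = true) by decide)]
        rw [if_neg (show ¬ ((['<', '>'] : List Char) = ['>', '=']) by decide)]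
        rw [if_neg (show ¬ ((['<', '>'] : List Char) = ['<']) by decide)]
        rw [if_neg (show ¬ ((['<', '>'] : List Char) = ['<', '=']) by decide)]
        rw [if_pos (show ((['<', '>'] : List Char) = ['<', '>']) by decide)]
        refine Eq.trans (foldl_count_prop (fun v => ¬ v = k) values 0) ?_
        omega
      · rw [if_neg (show ¬ (((['>'] : List Char) == ['>', '=']) = true) by decide)]
        rw [if_neg (show ¬ (((['>'] : List Char) == ['<']) = true) by decide)]
        rw [if_neg (show ¬ (((['>'] : List Char) == ['<', '=']) = true) by decide)]
        rw [if_neg (show ¬ (((['>'] : List Char) == ['<', '>']) = true) by decide)]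
        rw [if_pos (show (((['>'] : List Char) == ['>']) = true) by decide)]
        rw [if_neg (show ¬ ((['>'] : List Char) = ['>', '=']) by decide)]
        rw [if_neg (show ¬ ((['>'] : List Char) = ['<']) by decide)]
        rw [if_neg (show ¬ ((['>'] : List Char) = ['<', '=']) by decide)]
        rw [if_neg (show ¬ ((['>'] : List Char) = ['<', '>']) by decide)]
        refine Eq.trans (foldl_count_prop (fun v => k < v) values 0) ?_
        omega
    · simp only [List.mem_cons, List.not_mem_nil, or_false] at hm
      push Not at hm
      obtain ⟨h1, h2, h3, h4, h5⟩ := hm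
      simp [h1, h2, h3, h4, h5]

-- ===== VERDICT =====
theorem count_if_spec : Claim_equal_count_if := by
  intro values criteria _hdom hpre
  unfold Spec_count_if count_if count_if_alt
  rw [count_if_parse]
  exact core_eq values _ _ hpre
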